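-- pv_equiv track=rewrite | github.com/heliyanyu/AI-totel-editing | scripts/render_progress_bar.py | get_node_states
-- ===== SOURCE A (Python) =====
-- def get_node_states(active_topic_id: str | None,
--                     nodes: list[dict]) -> dict[str, str]:
--     states: dict[str, str] = {}
--     active_index = -1
--     for i, node in enumerate(nodes):
--         if node["id"] == active_topic_id:
--             active_index = i
--             break
--
--     for i, node in enumerate(nodes):
--         if active_index == -1 or i > active_index:
--             states[node["id"]] = "pending"
--         elif i < active_index:
--             states[node["id"]] = "completed"
--         else:
--             states[node["id"]] = "active"
--     return states
-- ===== SOURCE B (Python) =====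
-- def get_node_states(active_topic_id, nodes):
--     # One recursive pass, back-to-front information flow: go(rest) returns
--     # (labels for rest, whether the active id occurs in rest). On a match the
--     # whole tail is "pending"; a non-matching head is "completed" exactly when
--     # the match lies somewhere in its tail, else "pending". No index is ever computed.
--     def go(rest):
--         if not rest:
--             return [], False
--         if rest[0]["id"] == active_topic_id:
--             return ["active"] + ["pending"] * (len(rest) - 1), True
--         tail, found = go(rest[1:])
--         return ["completed" if found else "pending"] + tail, found
--
--     labels, _ = go(nodes)
--     return {node["id"]: lab for node, lab in zip(nodes, labels)}
-- ===== Notes on version B (the rewrite author's own statement) =====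
-- stated objective: alternative
-- what changed: B replaces A's two forward scans (find the active index, then compare each position against it) by one structural recursion with backward information flow: the recursion returns the tail's labels together with a found-in-tail flag, labels everything after a match 'pending' immediately, and decides 'completed' vs 'pending' for earlier nodes from the flag returned by the tail; no index or position comparison exists in B.
import Mathlib
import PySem

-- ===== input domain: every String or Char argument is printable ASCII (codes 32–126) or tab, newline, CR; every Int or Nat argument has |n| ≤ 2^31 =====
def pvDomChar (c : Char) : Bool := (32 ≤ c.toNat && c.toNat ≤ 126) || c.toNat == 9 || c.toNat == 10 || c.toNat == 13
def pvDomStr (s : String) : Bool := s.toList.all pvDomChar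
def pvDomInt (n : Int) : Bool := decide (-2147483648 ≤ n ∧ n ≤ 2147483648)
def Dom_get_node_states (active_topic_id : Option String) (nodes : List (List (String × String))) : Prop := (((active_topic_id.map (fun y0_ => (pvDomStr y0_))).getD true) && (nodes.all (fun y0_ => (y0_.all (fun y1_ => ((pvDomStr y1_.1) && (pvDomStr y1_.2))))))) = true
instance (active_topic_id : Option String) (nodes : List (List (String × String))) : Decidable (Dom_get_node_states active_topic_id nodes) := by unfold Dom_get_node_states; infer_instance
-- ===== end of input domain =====

-- B replaces A's index-finding and position comparisons by one structural recursion
-- with a backward found-in-tail flag; objective: alternative (same cost, no indices).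

-- ===== PORT A =====
-- node["id"] (first match in the node's association list; Pre_ guarantees the key exists)
def pvId (n : List (String × String)) : String := ((PySem.Dict.mk n).get? "id").getD ""

-- first loop of A: find active_index (break at first match), -1 if none
def pvFind (a : Option String) : List (List (String × String)) → Int → Int
  | [], _ => -1
  | n :: rest, i => if (some (pvId n) == a) then i else pvFind a rest (i + 1)

-- second loop of A: label each node by comparing its position with active_index
def pvLabel (aix : Int) : List (List (String × String)) → Int → PySem.Dict String String → PySem.Dict String String
  | [], _, st => st
  | n :: rest, i, st =>
      pvLabel aix rest (i + 1)
        (if aix == -1 || i > aix then st.insert (pvId n) "pending"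
         else if i < aix then st.insert (pvId n) "completed"
         else st.insert (pvId n) "active")

def get_node_states (active_topic_id : Option String) (nodes : List (List (String × String))) : List (String × String) :=
  (pvLabel (pvFind active_topic_id nodes 0) nodes 0 PySem.Dict.empty).items

-- ===== PORT B =====
-- B's recursive helper go: labels of the suffix plus "active id occurs in the suffix"
def pvGo (a : Option String) : List (List (String × String)) → List String × Bool
  | [] => ([], false)
  | n :: rest =>
      if (some (pvId n) == a) then ("active" :: List.replicate rest.length "pending", true)
      else
        let r := pvGo a rest
        ((if r.2 then "completed" else "pending") :: r.1, r.2)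

-- the dict comprehension over zip(nodes, labels)
def get_node_states_alt (active_topic_id : Option String) (nodes : List (List (String × String))) : List (String × String) :=
  (PySem.Dict.ofList ((nodes.map pvId).zip (pvGo active_topic_id nodes).1)).items

-- ===== PRECONDITION & SPEC =====
-- Pre_ excludes nodes missing the key "id": there Python A raises KeyError (node["id"]).
def Pre_get_node_states (active_topic_id : Option String) (nodes : List (List (String × String))) : Prop :=
  ∀ n ∈ nodes, ((PySem.Dict.mk n).get? "id").isSome = true
instance (active_topic_id : Option String) (nodes : List (List (String × String))) : Decidable (Pre_get_node_states active_topic_id nodes) := by unfold Pre_get_node_states; infer_instance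

def pvWitness_get_node_states : Option String × (List (List (String × String))) :=
  (some "b", [[("id", "a")], [("id", "b")], [("id", "c")]])

def Spec_get_node_states (active_topic_id : Option String) (nodes : List (List (String × String))) (out : List (String × String)) : Prop := out = get_node_states_alt active_topic_id nodes
instance (active_topic_id : Option String) (nodes : List (List (String × String))) (out : List (String × String)) : Decidable (Spec_get_node_states active_topic_id nodes out) := by unfold Spec_get_node_states; infer_instance

-- ===== CLAIM (what is proved, stated in full; the proofs are below) =====
def Claim_equal_get_node_states : Prop := ∀ (active_topic_id : Option String) (nodes : List (List (String × String))), Dom_get_node_states active_topic_id nodes → Pre_get_node_states active_topic_id nodes → Spec_get_node_states active_topic_id nodes (get_node_states active_topic_id nodes)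

-- ===== LEMMAS AND PROOFS =====

-- the fold B's dict building performs
def pvIns (st : PySem.Dict String String) (pairs : List (String × String)) : PySem.Dict String String :=
  pairs.foldl (fun d p => d.insert p.1 p.2) st

theorem pvFind_none (a : Option String) (nodes : List (List (String × String))) (i : Int)
    (h : ∀ n ∈ nodes, (some (pvId n) == a) = false) : pvFind a nodes i = -1 := by
  induction nodes generalizing i with
  | nil => rfl
  | cons n rest ih =>
      simp only [pvFind, h n (by simp)]
      exact ih (i + 1) (fun m hm => h m (by simp [hm]))

theorem pvGo_none (a : Option String) (nodes : List (List (String × String)))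
    (h : ∀ n ∈ nodes, (some (pvId n) == a) = false) :
    pvGo a nodes = (List.replicate nodes.length "pending", false) := by
  induction nodes with
  | nil => rfl
  | cons n rest ih =>
      simp only [pvGo, h n (by simp), Bool.false_eq_true, if_false,
        ih (fun m hm => h m (by simp [hm])), List.length_cons, List.replicate_succ]

theorem pvLabel_pending (aix : Int) (nodes : List (List (String × String))) (i : Int)
    (st : PySem.Dict String String) (h : aix = -1 ∨ aix < i) :
    pvLabel aix nodes i st = pvIns st ((nodes.map pvId).zip (List.replicate (nodes.map pvId).length "pending")) := by
  induction nodes generalizing i st with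
  | nil => rfl
  | cons n rest ih =>
      have hc : (aix == -1 || i > aix) = true := by
        rcases h with h | h <;> simp [h]
      simp only [pvLabel, hc, List.map_cons, List.length_cons, List.replicate_succ,
        List.zip_cons_cons, pvIns, List.foldl_cons]
      exact ih (i + 1) _ (by rcases h with h | h <;> [left; right] <;> omega)

theorem pvIndexSucc {a : String} {l : List String} {k : ℕ}
    (h : Option.map (fun x => x + 1) (PySem.List.index? l a) = some k) :
    ∃ k', PySem.List.index? l a = some k' ∧ k = k' + 1 := by
  cases hx : PySem.List.index? l a with
  | none => rw [hx] at h; simp at h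
  | some k'' =>
      rw [hx] at h
      simp only [Option.map_some] at h
      exact ⟨k'', rfl, (Option.some.inj h).symm⟩

theorem pvFind_found (a : String) (nodes : List (List (String × String))) (i : Int) (k : ℕ)
    (h : PySem.List.index? (nodes.map pvId) a = some k) :
    pvFind (some a) nodes i = i + k := by
  induction nodes generalizing i k with
  | nil => simp at h
  | cons n rest ih =>
      by_cases he : pvId n = a
      · subst he
        rw [List.map_cons, PySem.List.index?_cons_self] at h
        obtain rfl : (0 : ℕ) = k := Option.some.inj h
        simp [pvFind]
      · rw [List.map_cons, PySem.List.index?_cons_of_ne _ he] at h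
        obtain ⟨k', hk', rfl⟩ := pvIndexSucc h
        have hne : (some (pvId n) == some a) = false := by simp [he]
        simp only [pvFind, hne, Bool.false_eq_true, if_false]
        rw [ih (i + 1) k' hk']
        push_cast; ring

theorem pvGo_found (a : String) (nodes : List (List (String × String))) (k : ℕ)
    (h : PySem.List.index? (nodes.map pvId) a = some k) :
    pvGo (some a) nodes =
      (List.replicate k "completed" ++ "active" :: List.replicate (nodes.length - k - 1) "pending", true) := by
  induction nodes generalizing k with
  | nil => simp at h
  | cons n rest ih =>
      by_cases he : pvId n = a
      · subst he
        rw [List.map_cons, PySem.List.index?_cons_self] at h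
        obtain rfl : (0 : ℕ) = k := Option.some.inj h
        simp [pvGo]
      · rw [List.map_cons, PySem.List.index?_cons_of_ne _ he] at h
        obtain ⟨k', hk', rfl⟩ := pvIndexSucc h
        have hne : (some (pvId n) == some a) = false := by simp [he]
        simp only [pvGo, hne, Bool.false_eq_true, if_false, ih k' hk', List.length_cons,
          List.replicate_succ, List.cons_append]
        simp [Nat.succ_sub_succ]

theorem pvLabel_found (a : String) (nodes : List (List (String × String))) (i : Int) (k : ℕ)
    (st : PySem.Dict String String) (hi : 0 ≤ i)
    (h : PySem.List.index? (nodes.map pvId) a = some k) :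
    pvLabel (i + k) nodes i st =
      pvIns st ((nodes.map pvId).zip
        (List.replicate k "completed" ++ "active" :: List.replicate (nodes.length - k - 1) "pending")) := by
  induction nodes generalizing i k st with
  | nil => simp at h
  | cons n rest ih =>
      by_cases he : pvId n = a
      · subst he
        rw [List.map_cons, PySem.List.index?_cons_self] at h
        obtain rfl : (0 : ℕ) = k := Option.some.inj h
        have hc1 : ((i + (0:ℕ) : Int) == -1 || i > i + (0:ℕ)) = false := by
          simp; omega
        have hc2 : ¬ (i < i + (0:ℕ)) := by omega
        simp only [pvLabel, hc1, Bool.false_eq_true, if_false, if_neg hc2,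
          List.replicate_zero, List.nil_append, List.map_cons, List.zip_cons_cons, pvIns,
          List.foldl_cons, List.length_cons]
        have := pvLabel_pending (i + (0:ℕ)) rest (i + 1) (st.insert (pvId n) "active") (by right; omega)
        simpa [pvIns, Nat.sub_zero] using this
      · rw [List.map_cons, PySem.List.index?_cons_of_ne _ he] at h
        obtain ⟨k', hk', rfl⟩ := pvIndexSucc h
        have hc1 : ((i + ((k' + 1 : ℕ)) : Int) == -1 || i > i + ((k' + 1 : ℕ))) = false := by
          simp; constructor <;> omega
        have hc2 : i < i + ((k' + 1 : ℕ) : Int) := by push_cast; omega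
        simp only [pvLabel, hc1, Bool.false_eq_true, if_false, if_pos hc2,
          List.replicate_succ, List.cons_append, List.map_cons, List.zip_cons_cons, pvIns,
          List.foldl_cons, List.length_cons]
        have harg : (i + ((k' + 1 : ℕ) : Int)) = (i + 1) + (k' : ℕ) := by push_cast; ring
        rw [harg]
        have := ih (i + 1) k' (st.insert (pvId n) "completed") (by omega) hk'
        simpa [pvIns, Nat.succ_sub_succ] using this

-- ===== VERDICT (by name: the statement is the Claim_ definition above) =====
theorem get_node_states_spec : Claim_equal_get_node_states := by
  intro a nodes _ _
  unfold Spec_get_node_states get_node_states get_node_states_alt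
  have hins : ∀ l, PySem.Dict.ofList l = pvIns PySem.Dict.empty l := fun _ => rfl
  cases a with
  | none =>
      rw [pvFind_none none nodes 0 (by intro n _; rfl),
        pvGo_none none nodes (by intro n _; rfl),
        pvLabel_pending (-1) nodes 0 PySem.Dict.empty (Or.inl rfl)]
      simp [hins]
  | some a =>
      cases hx : PySem.List.index? (nodes.map pvId) a with
      | some k =>
          rw [pvFind_found a nodes 0 k hx, pvGo_found a nodes k hx,
            pvLabel_found a nodes 0 k PySem.Dict.empty (le_refl 0) hx]
          simp [hins]
      | none =>
          have hno : ∀ n ∈ nodes, (some (pvId n) == some a) = false := by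
            intro n hn
            have : pvId n ≠ a := fun he =>
              ((PySem.List.index?_eq_none_iff _ _).1 hx) (he ▸ List.mem_map_of_mem hn)
            simp [this]
          rw [pvFind_none (some a) nodes 0 hno, pvGo_none (some a) nodes hno,
            pvLabel_pending (-1) nodes 0 PySem.Dict.empty (Or.inl rfl)]
          simp [hins]
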